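-- pv_equiv track=rewrite | github.com/Sriram1920/Sriram-programs | Student details marks pairs.py | studypairs
-- ===== SOURCE A (Python) =====
-- def studypairs(dic):
--     key=[]
--     for i in dic.keys():
--         key.append(i)
--     i=0
--     main=[]
--     key.sort()
--     while key!=[]:
--         l1=[]
--         l1.append(dic[key[len(key)-1]])
--         l1.append(dic[key[0]])
--
--         key.pop(0)
--         key.pop(len(key)-1)
--         main.append(l1)
--         i+=1
--     return main
-- ===== SOURCE B (Python) =====
-- def studypairs(dic):
--     # two-pointer style: sorted keys zipped with their reverse, keep first ceil(n/2) pairs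
--     keys = sorted(dic)
--     half = (len(keys) + 1) // 2
--     return [[dic[hi], dic[lo]] for lo, hi in zip(keys, reversed(keys))][:half]
-- ===== Notes on version B (the rewrite author's own statement) =====
-- stated objective: faster
-- what changed: A repeatedly pops the first and last element of the sorted key list (pop(0) shifts the whole list each iteration); B sorts the keys once and builds all pairs in a single pass by zipping the sorted keys with their reverse and keeping the first ceil(n/2) pairs.
-- crash fix: On dicts with an odd number of distinct keys A raises IndexError (pop from empty list) while B returns the full pairing with the middle key paired with itself. — e.g. on studypairs([(1, 10), (2, 20), (3, 30)]): A raises IndexError, B returns [[30, 10], [20, 20]]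
import Mathlib
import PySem

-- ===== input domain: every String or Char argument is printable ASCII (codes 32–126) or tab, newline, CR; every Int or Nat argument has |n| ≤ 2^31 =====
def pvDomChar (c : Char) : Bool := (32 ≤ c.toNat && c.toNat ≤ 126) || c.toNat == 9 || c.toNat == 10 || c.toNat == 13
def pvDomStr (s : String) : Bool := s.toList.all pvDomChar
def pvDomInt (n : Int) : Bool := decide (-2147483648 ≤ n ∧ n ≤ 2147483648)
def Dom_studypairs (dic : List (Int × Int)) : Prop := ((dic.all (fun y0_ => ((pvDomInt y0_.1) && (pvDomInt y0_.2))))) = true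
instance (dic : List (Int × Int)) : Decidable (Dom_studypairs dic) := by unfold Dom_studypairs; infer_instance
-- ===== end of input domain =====

-- B pairs the sorted keys with their reverse in one pass instead of A's repeated pop(0) scans: O(n log n) vs O(n^2).
-- On an odd number of distinct keys Python A raises IndexError (pop from empty list); Pre_ excludes that (see Raises_ block).

-- ===== PORT A =====
-- while key != []: pair (dic[key[-1]], dic[key[0]]), key.pop(0), key.pop(len-1).
-- The pop(len-1) on the already-emptied list (odd case, Python IndexError) is modelled by dropLast [] = [];
-- those inputs are excluded by Pre_studypairs.
def studypairsLoop (d : PySem.Dict Int Int) : List Int → List (List Int)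
  | [] => []
  | k :: rest =>
      [d.getD ((k :: rest).getLast (by simp)) 0, d.getD k 0] :: studypairsLoop d rest.dropLast
termination_by key => key.length
decreasing_by simp

def studypairs (dic : List (Int × Int)) : List (List Int) :=
  let d := PySem.Dict.ofList dic
  -- key = list(dic.keys()); key.sort()
  studypairsLoop d (PySem.List.sorted d.keys (fun x => x) false)

-- ===== PORT B =====
def studypairs_alt (dic : List (Int × Int)) : List (List Int) :=
  let d := PySem.Dict.ofList dic
  let keys := PySem.List.sorted d.keys (fun x => x) false
  -- [[dic[hi], dic[lo]] for lo, hi in zip(keys, reversed(keys))][:half], half = (n+1)//2 ≥ 0 so the slice is take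
  ((keys.zip keys.reverse).map (fun p => [d.getD p.2 0, d.getD p.1 0])).take ((keys.length + 1) / 2)

-- ===== PRECONDITION & SPEC =====
-- Pre_ excludes dicts with an odd number of (distinct) keys, on which Python A raises IndexError ('pop from empty list').
def Pre_studypairs (dic : List (Int × Int)) : Prop :=
  (PySem.Set.ofList (dic.map Prod.fst)).length % 2 = 0
instance (dic : List (Int × Int)) : Decidable (Pre_studypairs dic) := by unfold Pre_studypairs; infer_instance
def pvWitness_studypairs : (List (Int × Int)) := [(1, 10), (2, 20), (3, 30), (4, 40)]

-- On dicts with an odd number of distinct keys A raises IndexError while B returns the full pairing (middle key paired with itself).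
def Raises_studypairs (dic : List (Int × Int)) : Prop :=
  (PySem.Set.ofList (dic.map Prod.fst)).length % 2 = 1
instance (dic : List (Int × Int)) : Decidable (Raises_studypairs dic) := by unfold Raises_studypairs; infer_instance
def pvRaiseWitness_studypairs : (List (Int × Int)) := [(1, 10), (2, 20), (3, 30)]
def pvRaiseWitnessOut_studypairs : List (List Int) := [[30, 10], [20, 20]]

def Spec_studypairs (dic : List (Int × Int)) (out : List (List Int)) : Prop := out = studypairs_alt dic
instance (dic : List (Int × Int)) (out : List (List Int)) : Decidable (Spec_studypairs dic out) := by unfold Spec_studypairs; infer_instance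

-- ===== CLAIM (what is proved, stated in full; the proofs are below) =====
def Claim_equal_studypairs : Prop := ∀ (dic : List (Int × Int)), Dom_studypairs dic → Pre_studypairs dic → Spec_studypairs dic (studypairs dic)
def Claim_raises_studypairs : Prop := (∀ (dic : List (Int × Int)), Dom_studypairs dic → Raises_studypairs dic → ¬ Pre_studypairs dic) ∧ (Dom_studypairs (pvRaiseWitness_studypairs) ∧ Raises_studypairs (pvRaiseWitness_studypairs) ∧ studypairs_alt (pvRaiseWitness_studypairs) = pvRaiseWitnessOut_studypairs)

-- ===== LEMMAS AND PROOFS =====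

-- A's pop-both-ends loop equals B's zip-with-reverse pairing, on ANY key list (the odd middle pairs with itself).
lemma studypairsLoop_eq_zip (d : PySem.Dict Int Int) :
    ∀ n (key : List Int), key.length ≤ n →
      studypairsLoop d key =
        ((key.zip key.reverse).map (fun p => [d.getD p.2 0, d.getD p.1 0])).take ((key.length + 1) / 2) := by
  intro n
  induction n with
  | zero =>
      intro key h
      have : key = [] := List.eq_nil_of_length_eq_zero (Nat.le_zero.mp h)
      subst this; simp [studypairsLoop]
  | succ n ih =>
      intro key h
      match key with
      | [] => simp [studypairsLoop]
      | k :: rest =>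
        rcases rest.eq_nil_or_concat with rfl | ⟨m, e, rfl⟩
        · simp [studypairsLoop]
        · simp only [List.concat_eq_append] at h ⊢
          have hlen : m.length = m.reverse.length := by simp
          have hdrop : (m ++ [e]).dropLast = m := by simp
          have hlast : (k :: (m ++ [e])).getLast (by simp) = e := by
            rw [List.getLast_cons (by simp)]
            exact List.getLast_concat ..
          simp only [studypairsLoop]
          rw [hdrop, hlast, ih m (by simp at h ⊢; omega)]
          have hrev : (k :: (m ++ [e])).reverse = e :: (m.reverse ++ [k]) := by simp
          rw [hrev]
          have hzip : (k :: (m ++ [e])).zip (e :: (m.reverse ++ [k]))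
              = (k, e) :: (m.zip m.reverse ++ [(e, k)]) := by
            simp [List.zip_append hlen]
          rw [hzip]
          have hl : (k :: (m ++ [e])).length = m.length + 2 := by simp
          rw [hl]
          have h2 : (m.length + 2 + 1) / 2 = (m.length + 1) / 2 + 1 := by omega
          rw [h2]
          simp only [List.map_cons, List.take_succ_cons, List.map_append]
          congr 1
          rw [List.take_append_of_le_length (by simp; omega)]

theorem studypairs_spec : Claim_equal_studypairs := by
  intro dic _ _
  unfold Spec_studypairs studypairs studypairs_alt
  exact studypairsLoop_eq_zip _ _ _ le_rfl

def studypairs_raises : Claim_raises_studypairs := by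
  unfold Claim_raises_studypairs
  constructor
  · intro dic _ hodd hpre
    unfold Raises_studypairs at hodd
    unfold Pre_studypairs at hpre
    omega
  · exact ⟨by decide, by decide, by decide⟩
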